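-- pv_equiv track=rewrite | github.com/pelson/reactivepy | support/cell_ordering.py | source_to_cells
-- ===== SOURCE A (Python) =====
-- def source_to_cells(source):
--     cells = [[]]
--     for line in source.split('\n'):
--         if len(line) * '-' == line:
--             cells.append([])
--         else:
--             cells[-1].append(line)
--     cells = ['\n'.join(cell) for cell in cells]
--     return cells
-- ===== SOURCE B (Python) =====
-- def source_to_cells(source):
--     # Boundary-index decomposition: collect positions of separator lines once,
--     # then emit each cell as a slice between consecutive boundaries.
--     lines = source.split('\n')
--     bounds = [-1]
--     for i, line in enumerate(lines):
--         if line == len(line) * '-':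
--             bounds.append(i)
--     bounds.append(len(lines))
--     return ['\n'.join(lines[a + 1:b]) for a, b in zip(bounds, bounds[1:])]
-- ===== Notes on version B (the rewrite author's own statement) =====
-- stated objective: alternative
-- what changed: Replaces A's mutable state machine (append each line into the last cell, start a new cell on a separator) with a two-phase boundary computation: one pass collects the indices of separator lines, sentinels -1 and len(lines) are added, and each cell is produced as a slice of the line list between consecutive boundaries.
import Mathlib
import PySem

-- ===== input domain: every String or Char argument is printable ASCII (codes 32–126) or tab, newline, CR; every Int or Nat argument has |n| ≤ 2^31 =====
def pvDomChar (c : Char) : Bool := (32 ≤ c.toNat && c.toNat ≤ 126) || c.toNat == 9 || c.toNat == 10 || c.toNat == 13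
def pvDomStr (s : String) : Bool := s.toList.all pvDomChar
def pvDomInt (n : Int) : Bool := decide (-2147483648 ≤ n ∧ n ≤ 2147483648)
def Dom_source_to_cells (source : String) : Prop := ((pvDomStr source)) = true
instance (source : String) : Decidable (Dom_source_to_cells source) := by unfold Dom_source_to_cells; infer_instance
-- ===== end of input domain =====

-- B replaces A's append-to-last-cell state machine by a separator-index/boundary-slice
-- decomposition (alternative, same cost); proved to return the same list of cells.


-- ===== PORT A =====
-- 'line == len(line) * '-'' (string repetition compared on code points)
def isSep (line : String) : Bool := line.toList == List.replicate line.toList.length '-'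

-- source.split('\n'); the separator "\n" is nonempty, so split? is always `some`
def splitNL (source : String) : List String := (PySem.Str.split? source "\n").getD []

def source_to_cells (source : String) : List String :=
  let cells : List (List String) :=
    (splitNL source).foldl
      (fun cells line =>
        if isSep line then cells ++ [[]]
        else cells.dropLast ++ [cells.getLast! ++ [line]])
      [[]]
  cells.map (fun cell => PySem.Str.join "\n" cell)

-- ===== PORT B =====
-- the 'for i, line in enumerate(lines): if sep: bounds.append(i)' loop (bounds after the leading -1)
def sepIdx : List String → Int → List Int
  | [], _ => []
  | l :: ls, i => if isSep l then i :: sepIdx ls (i + 1) else sepIdx ls (i + 1)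

def source_to_cells_alt (source : String) : List String :=
  let lines := splitNL source
  let bounds : List Int := -1 :: (sepIdx lines 0 ++ [(lines.length : Int)])
  (bounds.zip bounds.tail).map
    (fun ab => PySem.Str.join "\n" (PySem.List.slice lines (some (ab.1 + 1)) (some ab.2)))

-- ===== PRECONDITION & SPEC =====
def Spec_source_to_cells (source : String) (out : List String) : Prop := out = source_to_cells_alt source
instance (source : String) (out : List String) : Decidable (Spec_source_to_cells source out) := by unfold Spec_source_to_cells; infer_instance

-- ===== CLAIM (what is proved, stated in full; the proofs are below) =====
def Claim_equal_source_to_cells : Prop := ∀ (source : String), Dom_source_to_cells source → Spec_source_to_cells source (source_to_cells source)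

-- ===== LEMMAS AND PROOFS =====

-- reference cell structure: split the line list on separator lines
def specCells : List String → List (List String)
  | [] => [[]]
  | l :: ls =>
    if isSep l then [] :: specCells ls
    else match specCells ls with
      | [] => [[l]]
      | c :: cs => (l :: c) :: cs

def consFront (x : List String) : List (List String) → List (List String)
  | [] => [x]
  | c :: cs => (x ++ c) :: cs

lemma specCells_ne_nil (ls : List String) : specCells ls ≠ [] := by
  cases ls with
  | nil => simp [specCells]
  | cons l ls =>
    simp only [specCells]
    split
    · simp
    · split <;> simp

lemma getLast!_concat (acc : List (List String)) (cur : List String) :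
    (acc ++ [cur]).getLast! = cur := by
  induction acc with
  | nil => rfl
  | cons a as ih =>
    cases as with
    | nil => rfl
    | cons b bs => simp only [List.cons_append, List.getLast!] at ih ⊢; exact ih

lemma aLoop (lines : List String) : ∀ (acc : List (List String)) (cur : List String),
    lines.foldl
      (fun cells line =>
        if isSep line then cells ++ [[]]
        else cells.dropLast ++ [cells.getLast! ++ [line]])
      (acc ++ [cur]) = acc ++ consFront cur (specCells lines) := by
  induction lines with
  | nil => intro acc cur; simp [specCells, consFront]
  | cons l ls ih =>
    intro acc cur
    simp only [List.foldl_cons]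
    by_cases h : isSep l
    · rw [if_pos h]
      rw [show acc ++ [cur] ++ [([] : List String)] = (acc ++ [cur]) ++ [[]] from by simp]
      rw [ih (acc ++ [cur]) []]
      simp only [specCells, if_pos h]
      cases hs : specCells ls with
      | nil => exact absurd hs (specCells_ne_nil ls)
      | cons c cs => simp [consFront]
    · rw [if_neg h]
      have hdrop : (acc ++ [cur]).dropLast = acc := by simp
      rw [hdrop, getLast!_concat, ih acc (cur ++ [l])]
      simp only [specCells, if_neg h]
      cases hs : specCells ls with
      | nil => simp [consFront]
      | cons c cs => simp [consFront]

-- elements of sepIdx are at least the starting index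
lemma sepIdx_ge (ls : List String) : ∀ (i : Int), ∀ x ∈ sepIdx ls i, i ≤ x := by
  induction ls with
  | nil => intro i x hx; simp [sepIdx] at hx
  | cons l ls ih =>
    intro i x hx
    simp only [sepIdx] at hx
    split at hx
    · rcases List.mem_cons.mp hx with rfl | hx
      · exact le_refl x
      · exact le_trans (by omega) (ih (i + 1) x hx)
    · exact le_trans (by omega) (ih (i + 1) x hx)

-- shifting the starting index shifts every collected index
lemma sepIdx_shift (ls : List String) : ∀ (i : Int), sepIdx ls (i + 1) = (sepIdx ls i).map (· + 1) := by
  induction ls with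
  | nil => intro i; simp [sepIdx]
  | cons l ls ih =>
    intro i
    simp only [sepIdx]
    split
    · rw [ih (i + 1)]; simp
    · rw [ih (i + 1)]

lemma sepIdx_one (ls : List String) : sepIdx ls 1 = (sepIdx ls 0).map (· + 1) := by
  have := sepIdx_shift ls 0
  simpa using this

-- cell list cut out of `lines` by consecutive boundary pairs
def toCells (lines : List String) (bounds : List Int) : List (List String) :=
  (bounds.zip bounds.tail).map (fun ab => PySem.List.slice lines (some (ab.1 + 1)) (some ab.2))

lemma toCells_cons (lines : List String) (a b : Int) (r : List Int) :
    toCells lines (a :: b :: r) = PySem.List.slice lines (some (a + 1)) (some b) :: toCells lines (b :: r) := by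
  simp [toCells]

lemma slice_shift (l : String) (ls : List String) (a b : Int) (ha : 0 ≤ a) (hb : 0 ≤ b) :
    PySem.List.slice (l :: ls) (some (a + 1)) (some (b + 1)) = PySem.List.slice ls (some a) (some b) := by
  rw [PySem.List.slice_toNat (l :: ls) (by omega) (by omega), PySem.List.slice_toNat ls ha hb]
  have h1 : (a + 1).toNat = a.toNat + 1 := by omega
  have h2 : (b + 1).toNat = b.toNat + 1 := by omega
  rw [h1, h2]
  simp

lemma slice_cons_zero (l : String) (ls : List String) (b : Int) (hb : 0 ≤ b) :
    PySem.List.slice (l :: ls) (some 0) (some (b + 1)) = l :: PySem.List.slice ls (some 0) (some b) := by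
  rw [PySem.List.slice_toNat (l :: ls) (by omega) (by omega), PySem.List.slice_toNat ls (by omega) hb]
  have h2 : (b + 1).toNat = b.toNat + 1 := by omega
  simp [h2]

lemma toCells_shift (l : String) (ls : List String) :
    ∀ (bounds : List Int), (∀ x ∈ bounds, -1 ≤ x) → (∀ x ∈ bounds.tail, 0 ≤ x) →
    toCells (l :: ls) (bounds.map (· + 1)) = toCells ls bounds := by
  intro bounds
  induction bounds with
  | nil => intro _ _; simp [toCells]
  | cons a rest ih =>
    intro h1 h2
    cases rest with
    | nil => simp [toCells]
    | cons b r =>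
      have hmap : (a :: b :: r).map (· + 1) = (a + 1) :: (b + 1) :: r.map (· + 1) := by simp
      rw [hmap, toCells_cons, toCells_cons]
      have hb0 : 0 ≤ b := h2 b (by simp)
      have ha1 : 0 ≤ a + 1 := by have := h1 a (by simp); omega
      rw [slice_shift l ls (a + 1) b ha1 hb0]
      have := ih (fun x hx => h1 x (List.mem_cons_of_mem a hx))
        (fun x hx => h2 x (List.mem_cons_of_mem b (by simpa using hx)))
      rw [show ((b :: r).map (· + 1)) = (b + 1) :: r.map (· + 1) from by simp] at this
      rw [this]

lemma bCells (lines : List String) :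
    toCells lines (-1 :: (sepIdx lines 0 ++ [(lines.length : Int)])) = specCells lines := by
  induction lines with
  | nil => decide
  | cons l ls ih =>
    have hlen : ((l :: ls).length : Int) = (ls.length : Int) + 1 := by push_cast [List.length_cons]; ring
    by_cases h : isSep l
    · -- separator line: sepIdx (l::ls) 0 = 0 :: sepIdx ls 1
      have hsep : sepIdx (l :: ls) 0 = 0 :: sepIdx ls 1 := by simp [sepIdx, h]
      rw [hsep]
      rw [show (-1 : Int) :: ((0 :: sepIdx ls 1) ++ [((l :: ls).length : Int)]) =
          -1 :: 0 :: (sepIdx ls 1 ++ [((l :: ls).length : Int)]) from by simp]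
      rw [toCells_cons]
      have hmap : (0 : Int) :: (sepIdx ls 1 ++ [((l :: ls).length : Int)]) =
          ((-1 : Int) :: (sepIdx ls 0 ++ [(ls.length : Int)])).map (· + 1) := by
        rw [sepIdx_one, hlen]
        simp
      rw [hmap, toCells_shift l ls _ ?h1 ?h2]
      case h1 =>
        intro x hx
        rcases List.mem_cons.mp hx with rfl | hx
        · omega
        · rcases List.mem_append.mp hx with hx | hx
          · have := sepIdx_ge ls 0 x hx; omega
          · simp at hx; omega
      case h2 =>
        intro x hx
        simp only [List.tail_cons] at hx
        rcases List.mem_append.mp hx with hx | hx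
        · exact sepIdx_ge ls 0 x hx
        · simp at hx; omega
      rw [ih]
      have hslice : PySem.List.slice (l :: ls) (some (-1 + 1)) (some 0) = ([] : List String) := by
        rw [show (-1 : Int) + 1 = 0 from by omega]
        rw [PySem.List.slice_toNat (l :: ls) (by omega) (by omega)]
        simp
      rw [hslice]
      simp [specCells, h]
    · -- ordinary line: sepIdx (l::ls) 0 = (sepIdx ls 0).map (· + 1)
      have hsep : sepIdx (l :: ls) 0 = (sepIdx ls 0).map (· + 1) := by
        simp only [sepIdx, if_neg h]
        simpa using sepIdx_one ls
      rw [hsep]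
      cases htl : sepIdx ls 0 ++ [(ls.length : Int)] with
      | nil => exact absurd htl (by simp)
      | cons b0 rest =>
        have hb0 : 0 ≤ b0 := by
          have hm : b0 ∈ sepIdx ls 0 ++ [(ls.length : Int)] := by rw [htl]; simp
          rcases List.mem_append.mp hm with hx | hx
          · exact sepIdx_ge ls 0 b0 hx
          · simp at hx; omega
        have hrest : ∀ x ∈ rest, 0 ≤ x := by
          intro x hx
          have hm : x ∈ sepIdx ls 0 ++ [(ls.length : Int)] := by rw [htl]; simp [hx]
          rcases List.mem_append.mp hm with hx' | hx'
          · exact sepIdx_ge ls 0 x hx'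
          · simp at hx'; omega
        have hbig : (sepIdx ls 0).map (· + 1) ++ [((l :: ls).length : Int)] =
            (b0 + 1) :: rest.map (· + 1) := by
          rw [hlen]
          have hmm : (sepIdx ls 0).map (· + 1) ++ [(ls.length : Int) + 1] =
              ((sepIdx ls 0) ++ [(ls.length : Int)]).map (· + 1) := by simp
          rw [hmm, htl]; simp
        rw [show (-1 : Int) :: ((sepIdx ls 0).map (· + 1) ++ [((l :: ls).length : Int)]) =
            -1 :: ((sepIdx ls 0).map (· + 1) ++ [((l :: ls).length : Int)]) from rfl]
        rw [hbig, toCells_cons]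
        have hslice0 : PySem.List.slice (l :: ls) (some (-1 + 1)) (some (b0 + 1)) =
            l :: PySem.List.slice ls (some 0) (some b0) := by
          rw [show (-1 : Int) + 1 = 0 from by omega]
          exact slice_cons_zero l ls b0 hb0
        rw [hslice0]
        have hshift : toCells (l :: ls) ((b0 + 1) :: rest.map (· + 1)) = toCells ls (b0 :: rest) := by
          have hmain := toCells_shift l ls (b0 :: rest) ?ha ?hb
          · rw [show ((b0 :: rest).map (· + 1)) = (b0 + 1) :: rest.map (· + 1) from by simp] at hmain
            exact hmain
          case ha =>
            intro x hx
            rcases List.mem_cons.mp hx with rfl | hx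
            · omega
            · have := hrest x hx; omega
          case hb => intro x hx; exact hrest x (by simpa using hx)
        rw [hshift]
        -- use IH, unfolded one step
        have ihstep : PySem.List.slice ls (some (-1 + 1)) (some b0) :: toCells ls (b0 :: rest) = specCells ls := by
          rw [← toCells_cons ls (-1) b0 rest, ← htl]
          exact ih
        rw [show (-1 : Int) + 1 = 0 from by omega] at ihstep
        simp only [specCells, if_neg h]
        rw [← ihstep]

-- ===== VERDICT (by name: the statement is the Claim_ definition above) =====
theorem source_to_cells_spec : Claim_equal_source_to_cells := by
  intro source _
  unfold Spec_source_to_cells source_to_cells source_to_cells_alt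
  set lines := splitNL source with hl
  have hA := aLoop lines [] []
  simp only [List.nil_append] at hA
  rw [hA]
  have hcf : consFront [] (specCells lines) = specCells lines := by
    cases hs : specCells lines with
    | nil => exact absurd hs (specCells_ne_nil lines)
    | cons c cs => simp [consFront]
  rw [hcf, ← bCells lines]
  simp only [toCells, List.map_map]
  rfl
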